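-- pv_equiv track=rewrite | github.com/struggling-student/PythonExercises | PythonExercises/Ordinamento/8/solution.py | es8
-- ===== SOURCE A (Python) =====
-- def es8(insieme):
--     ls_fin=[]
--     for p in insieme:
--         for p2 in insieme-{p}:
--             for i in range(2,len(p)+1):
--                 if p[-i:]==p2[:i]:
--                     ls_fin.append(p+p2[i:])
--                 else: continue
--     ls_fin=set(ls_fin)
--     ls_fin=list(ls_fin)
--     ls_fin.sort()
--     return ls_fin
-- ===== SOURCE B (Python) =====
-- def es8(insieme):
--     index = {}
--     for p2 in insieme:
--         for i in range(2, len(p2) + 1):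
--             index.setdefault(p2[:i], []).append(p2)
--     out = []
--     for p in insieme:
--         for i in range(2, len(p) + 1):
--             for p2 in index.get(p[-i:], []):
--                 if p2 != p:
--                     out.append(p + p2[i:])
--     return sorted(set(out))
-- ===== Notes on version B (the rewrite author's own statement) =====
-- stated objective: faster
-- what changed: Replaces the all-pairs scan (every p against every other p2 testing each overlap length) by a dict indexing every prefix of every string, so matching suffixes are found by hash lookup instead of scanning all other strings.
import Mathlib
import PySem

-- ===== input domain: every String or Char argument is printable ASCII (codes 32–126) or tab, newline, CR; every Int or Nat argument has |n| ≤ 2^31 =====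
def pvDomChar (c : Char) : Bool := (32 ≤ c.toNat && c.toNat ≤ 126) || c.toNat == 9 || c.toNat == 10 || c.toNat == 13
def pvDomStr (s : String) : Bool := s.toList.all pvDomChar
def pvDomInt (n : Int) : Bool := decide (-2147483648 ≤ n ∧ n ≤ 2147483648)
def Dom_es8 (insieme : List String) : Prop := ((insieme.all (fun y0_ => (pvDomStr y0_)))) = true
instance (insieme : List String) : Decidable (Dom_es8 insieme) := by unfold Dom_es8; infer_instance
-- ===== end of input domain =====

-- B indexes every prefix of every string in a dict and finds overlap partners by lookup
-- instead of A's all-pairs scan; equivalence of the sorted deduplicated result is proved.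

-- ===== PORT A =====
def es8 (insieme : List String) : List String :=
  let ls_fin : List String := insieme.foldl (fun acc p =>
    (PySem.Set.diff insieme [p]).foldl (fun acc p2 =>
      (PySem.List.pyRange 2 (PySem.Str.len p + 1) 1).foldl (fun acc i =>
        if PySem.Str.slice p (some (-i)) none = PySem.Str.slice p2 none (some i) then
          acc ++ [p ++ PySem.Str.slice p2 (some i) none]
        else acc) acc) acc) []
  PySem.List.sorted (PySem.Set.ofList ls_fin) (fun x => x) false

-- ===== PORT B =====
def es8_alt (insieme : List String) : List String :=
  let index : PySem.Dict String (List String) := insieme.foldl (fun d p2 =>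
    (PySem.List.pyRange 2 (PySem.Str.len p2 + 1) 1).foldl (fun d i =>
      PySem.Dict.modify d (PySem.Str.slice p2 none (some i)) [] (fun l => l ++ [p2])) d)
    PySem.Dict.empty
  let out : List String := insieme.foldl (fun acc p =>
    (PySem.List.pyRange 2 (PySem.Str.len p + 1) 1).foldl (fun acc i =>
      (PySem.Dict.getD index (PySem.Str.slice p (some (-i)) none) []).foldl (fun acc p2 =>
        if p2 ≠ p then acc ++ [p ++ PySem.Str.slice p2 (some i) none] else acc) acc) acc) []
  PySem.List.sorted (PySem.Set.ofList out) (fun x => x) false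

-- ===== PRECONDITION & SPEC =====
def Spec_es8 (insieme : List String) (out : List String) : Prop := out = es8_alt insieme
instance (insieme : List String) (out : List String) : Decidable (Spec_es8 insieme out) := by unfold Spec_es8; infer_instance

-- ===== CLAIM (what is proved, stated in full; the proofs are below) =====
def Claim_equal_es8 : Prop := ∀ (insieme : List String), Dom_es8 insieme → Spec_es8 insieme (es8 insieme)


-- ===== LEMMAS AND PROOFS =====

-- generic loop shapes
theorem pvFoldlAppend {α β : Type} (l : List α) (f : List β → α → List β) (g : α → List β)
    (hf : ∀ a y, f a y = a ++ g y) (acc : List β) : l.foldl f acc = acc ++ l.flatMap g := by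
  induction l generalizing acc with
  | nil => simp
  | cons x t ih => simp [hf, ih, List.flatMap_cons]

theorem pvFoldlFoldlFlatMap {α β γ : Type} (l : List α) (g : α → List β) (h : γ → β → γ)
    (init : γ) :
    l.foldl (fun d x => (g x).foldl h d) init = (l.flatMap g).foldl h init := by
  induction l generalizing init with
  | nil => simp
  | cons x t ih => simp [List.flatMap_cons, List.foldl_append, ih]

-- the overlap condition both programs realise
def PvCond (insieme : List String) (x : String) : Prop :=
  ∃ p ∈ insieme, ∃ p2 ∈ insieme, p2 ≠ p ∧ ∃ i : Int, 2 ≤ i ∧ i < PySem.Str.len p + 1 ∧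
    PySem.Str.slice p (some (-i)) none = PySem.Str.slice p2 none (some i) ∧
    x = p ++ PySem.Str.slice p2 (some i) none

-- A's collected list contains x iff PvCond
theorem pvMemA (insieme : List String) (x : String) :
    x ∈ insieme.foldl (fun acc p =>
      (PySem.Set.diff insieme [p]).foldl (fun acc p2 =>
        (PySem.List.pyRange 2 (PySem.Str.len p + 1) 1).foldl (fun acc i =>
          if PySem.Str.slice p (some (-i)) none = PySem.Str.slice p2 none (some i) then
            acc ++ [p ++ PySem.Str.slice p2 (some i) none]
          else acc) acc) acc) [] ↔ PvCond insieme x := by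
  rw [pvFoldlAppend _ _ (fun p => (PySem.Set.diff insieme [p]).flatMap (fun p2 =>
        (PySem.List.pyRange 2 (PySem.Str.len p + 1) 1).flatMap (fun i =>
          if PySem.Str.slice p (some (-i)) none = PySem.Str.slice p2 none (some i) then
            [p ++ PySem.Str.slice p2 (some i) none] else [])))]
  · unfold PvCond
    simp only [List.nil_append, List.mem_flatMap, PySem.Set.mem_diff, List.mem_singleton]
    constructor
    · rintro ⟨p, hp, p2, ⟨hp2, hne⟩, i, hi, hx⟩
      rw [PySem.List.mem_pyRange_one] at hi
      split at hx
      · rename_i hc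
        simp only [List.mem_singleton] at hx
        exact ⟨p, hp, p2, hp2, hne, i, hi.1, hi.2, hc, hx⟩
      · simp at hx
    · rintro ⟨p, hp, p2, hp2, hne, i, h2, hlt, hc, hx⟩
      refine ⟨p, hp, p2, ⟨hp2, hne⟩, i, ?_, ?_⟩
      · rw [PySem.List.mem_pyRange_one]; exact ⟨h2, hlt⟩
      · rw [if_pos hc]; simp [hx]
  · intro a p
    rw [pvFoldlAppend _ _ (fun p2 =>
        (PySem.List.pyRange 2 (PySem.Str.len p + 1) 1).flatMap (fun i =>
          if PySem.Str.slice p (some (-i)) none = PySem.Str.slice p2 none (some i) then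
            [p ++ PySem.Str.slice p2 (some i) none] else []))]
    intro a2 p2
    rw [pvFoldlAppend _ _ (fun i =>
          if PySem.Str.slice p (some (-i)) none = PySem.Str.slice p2 none (some i) then
            [p ++ PySem.Str.slice p2 (some i) none] else [])]
    intro a3 i
    split <;> simp

-- B's prefix index: all (prefix, string) pairs it records
def pvPairs (insieme : List String) : List (String × String) :=
  insieme.flatMap (fun p2 => (PySem.List.pyRange 2 (PySem.Str.len p2 + 1) 1).map
    (fun i => (PySem.Str.slice p2 none (some i), p2)))

theorem pvIndexGetD (insieme : List String) (k : String) :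
    PySem.Dict.getD (insieme.foldl (fun d p2 =>
      (PySem.List.pyRange 2 (PySem.Str.len p2 + 1) 1).foldl (fun d i =>
        PySem.Dict.modify d (PySem.Str.slice p2 none (some i)) [] (fun l => l ++ [p2])) d)
      PySem.Dict.empty) k [] =
    ((pvPairs insieme).filter (fun q => q.1 == k)).map (·.2) := by
  have hstep : (fun (d : PySem.Dict String (List String)) p2 =>
      (PySem.List.pyRange 2 (PySem.Str.len p2 + 1) 1).foldl (fun d i =>
        PySem.Dict.modify d (PySem.Str.slice p2 none (some i)) [] (fun l => l ++ [p2])) d) =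
      (fun d p2 =>
        ((PySem.List.pyRange 2 (PySem.Str.len p2 + 1) 1).map
          (fun i => (PySem.Str.slice p2 none (some i), p2))).foldl
          (fun d q => PySem.Dict.modify d q.1 [] (fun l => l ++ [q.2])) d) := by
    funext d p2
    rw [List.foldl_map]
  rw [hstep, pvFoldlFoldlFlatMap, ← pvPairs]
  rw [PySem.Dict.getD_foldl_modify_append]
  simp [PySem.Dict.getD_empty]

theorem pvMemGetD (insieme : List String) (k p2 : String) :
    p2 ∈ (((pvPairs insieme).filter (fun q => q.1 == k)).map (·.2)) ↔
      p2 ∈ insieme ∧ ∃ i : Int, 2 ≤ i ∧ i < PySem.Str.len p2 + 1 ∧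
        PySem.Str.slice p2 none (some i) = k := by
  unfold pvPairs
  simp only [List.mem_map, List.mem_filter, List.mem_flatMap, PySem.List.mem_pyRange_one]
  constructor
  · rintro ⟨⟨k', p2'⟩, ⟨⟨q, hq, i, hi, he⟩, hk⟩, rfl⟩
    simp only [Prod.mk.injEq] at he
    obtain ⟨he1, rfl⟩ := he
    simp only [beq_iff_eq] at hk
    exact ⟨hq, i, hi.1, hi.2, by rw [he1]; exact hk⟩
  · rintro ⟨hp2, i, h2, hlt, hk⟩
    exact ⟨(k, p2), ⟨⟨p2, hp2, i, ⟨h2, hlt⟩, by rw [hk]⟩, by simp⟩, rfl⟩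

-- slice length facts
theorem pvLenSuffix (p : String) (i : Int) (h2 : 2 ≤ i) (hle : i ≤ (p.toList.length : Int)) :
    (PySem.Str.slice p (some (-i)) none).toList.length = i.toNat := by
  have hi : i = ((i.toNat : Nat) : Int) := by omega
  have h0 : 0 < i.toNat := by omega
  have hlen : i.toNat ≤ p.toList.length := by omega
  rw [show (PySem.Str.slice p (some (-i)) none).toList
        = PySem.List.slice p.toList (some (-i)) none by simp [PySem.Chars.slice]]
  rw [hi, PySem.List.slice_from_neg_natCast p.toList i.toNat h0]
  simp only [Int.toNat_natCast, List.length_drop]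
  omega

theorem pvLenPrefix (p2 : String) (i : Int) (h0 : 0 ≤ i) :
    (PySem.Str.slice p2 none (some i)).toList.length = min i.toNat p2.toList.length := by
  have hi : i = ((i.toNat : Nat) : Int) := by omega
  rw [show (PySem.Str.slice p2 none (some i)).toList
        = PySem.List.slice p2.toList none (some i) by simp [PySem.Chars.slice]]
  rw [hi, PySem.List.slice_to_natCast p2.toList i.toNat]
  simp only [Int.toNat_natCast, List.length_take]

-- the two conditions coincide
theorem pvMemB (insieme : List String) (x : String) :
    x ∈ insieme.foldl (fun acc p =>
      (PySem.List.pyRange 2 (PySem.Str.len p + 1) 1).foldl (fun acc i =>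
        (PySem.Dict.getD (insieme.foldl (fun d p2 =>
            (PySem.List.pyRange 2 (PySem.Str.len p2 + 1) 1).foldl (fun d i =>
              PySem.Dict.modify d (PySem.Str.slice p2 none (some i)) [] (fun l => l ++ [p2])) d)
            PySem.Dict.empty) (PySem.Str.slice p (some (-i)) none) []).foldl (fun acc p2 =>
          if p2 ≠ p then acc ++ [p ++ PySem.Str.slice p2 (some i) none] else acc) acc) acc) []
      ↔ PvCond insieme x := by
  rw [pvFoldlAppend _ _ (fun p => (PySem.List.pyRange 2 (PySem.Str.len p + 1) 1).flatMap (fun i =>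
      (PySem.Dict.getD (insieme.foldl (fun d p2 =>
          (PySem.List.pyRange 2 (PySem.Str.len p2 + 1) 1).foldl (fun d i =>
            PySem.Dict.modify d (PySem.Str.slice p2 none (some i)) [] (fun l => l ++ [p2])) d)
          PySem.Dict.empty) (PySem.Str.slice p (some (-i)) none) []).flatMap (fun p2 =>
        if p2 ≠ p then [p ++ PySem.Str.slice p2 (some i) none] else [])))]
  · unfold PvCond
    simp only [List.nil_append, List.mem_flatMap, PySem.List.mem_pyRange_one, pvIndexGetD,
      pvMemGetD]
    constructor
    · rintro ⟨p, hp, i, ⟨h2, hlt⟩, p2, ⟨⟨hp2, i', h2', hlt', hk⟩, hx⟩⟩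
      split at hx
      · rename_i hne
        simp only [List.mem_singleton] at hx
        have hsl : PySem.Str.len p = (p.toList.length : Int) := by simp [PySem.Str.len_eq]
        have hsl2 : PySem.Str.len p2 = (p2.toList.length : Int) := by simp [PySem.Str.len_eq]
        -- lengths force i' = i
        have hL : (PySem.Str.slice p2 none (some i')).toList.length
            = (PySem.Str.slice p (some (-i)) none).toList.length := by rw [hk]
        rw [pvLenPrefix p2 i' (by omega), pvLenSuffix p i h2 (by omega)] at hL
        have hii : i' = i := by omega
        subst hii
        exact ⟨p, hp, p2, hp2, hne, i', h2, hlt, hk.symm, hx⟩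
      · simp at hx
    · rintro ⟨p, hp, p2, hp2, hne, i, h2, hlt, hc, hx⟩
      have hsl : PySem.Str.len p = (p.toList.length : Int) := by simp [PySem.Str.len_eq]
      have hsl2 : PySem.Str.len p2 = (p2.toList.length : Int) := by simp [PySem.Str.len_eq]
      have hL : (PySem.Str.slice p (some (-i)) none).toList.length
          = (PySem.Str.slice p2 none (some i)).toList.length := by rw [hc]
      rw [pvLenPrefix p2 i (by omega), pvLenSuffix p i h2 (by omega)] at hL
      refine ⟨p, hp, i, ⟨h2, hlt⟩, p2, ⟨⟨hp2, i, h2, by omega, hc.symm⟩, ?_⟩⟩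
      rw [if_pos hne]; simp [hx]
  · intro a p
    rw [pvFoldlAppend _ _ (fun i =>
      (PySem.Dict.getD (insieme.foldl (fun d p2 =>
          (PySem.List.pyRange 2 (PySem.Str.len p2 + 1) 1).foldl (fun d i =>
            PySem.Dict.modify d (PySem.Str.slice p2 none (some i)) [] (fun l => l ++ [p2])) d)
          PySem.Dict.empty) (PySem.Str.slice p (some (-i)) none) []).flatMap (fun p2 =>
        if p2 ≠ p then [p ++ PySem.Str.slice p2 (some i) none] else []))]
    intro a2 i
    rw [pvFoldlAppend _ _ (fun p2 =>
        if p2 ≠ p then [p ++ PySem.Str.slice p2 (some i) none] else [])]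
    intro a3 p2
    split <;> simp

-- ===== VERDICT (by name: the statement is the Claim_ definition above) =====
theorem es8_spec : Claim_equal_es8 := by
  intro insieme _
  unfold Spec_es8 es8 es8_alt
  apply PySem.List.sorted_eq_sorted_of_perm _ _ (fun x => x) (fun a b hab => hab)
  rw [List.perm_ext_iff_of_nodup (PySem.Set.nodup_ofList _) (PySem.Set.nodup_ofList _)]
  intro x
  rw [PySem.Set.mem_ofList, PySem.Set.mem_ofList, pvMemA, pvMemB]
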